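-- pv_equiv track=rewrite | github.com/cs-cspit/Security-Entry---Exit-Management-System | demo_yolo_cameras.py | _find_matching_body
-- ===== SOURCE A (Python) =====
-- def _find_matching_body(face_bbox, body_detections):
--     """Find the body detection that best matches a face detection."""
--     fx, fy, fw, fh, _ = face_bbox
--     face_center_x = fx + fw // 2
--     face_center_y = fy + fh // 2
--
--     best_body = None
--     min_distance = float("inf")
--
--     for body_bbox in body_detections:
--         bx, by, bw, bh, _ = body_bbox
--         body_center_x = bx + bw // 2
--         body_center_y = by + bh // 2
--
--         # Face should be in upper part of body
--         if (
--             face_center_y < body_center_y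
--             and face_center_x > bx
--             and face_center_x < (bx + bw)
--         ):
--             distance = abs(face_center_x - body_center_x)
--             if distance < min_distance:
--                 min_distance = distance
--                 best_body = body_bbox
--
--     return best_body
-- ===== SOURCE B (Python) =====
-- def _find_matching_body(face_bbox, body_detections):
--     """Find the body detection that best matches a face detection."""
--     fx, fy, fw, fh, _ = face_bbox
--     face_center_x = fx + fw // 2
--     face_center_y = fy + fh // 2
--     candidates = [
--         b for b in body_detections
--         if face_center_y < b[1] + b[3] // 2 and b[0] < face_center_x < b[0] + b[2]
--     ]
--     ranked = sorted(candidates, key=lambda b: abs(face_center_x - (b[0] + b[2] // 2)))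
--     return ranked[0] if ranked else None
-- ===== Notes on version B (the rewrite author's own statement) =====
-- stated objective: alternative
-- what changed: Replaced A's single-pass running-minimum scan by filtering the qualifying bodies and stable-sorting them by |face_center_x - body_center_x|, returning the first element of the sorted list (sort stability reproduces A's first-minimum tie-break).
import Mathlib
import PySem

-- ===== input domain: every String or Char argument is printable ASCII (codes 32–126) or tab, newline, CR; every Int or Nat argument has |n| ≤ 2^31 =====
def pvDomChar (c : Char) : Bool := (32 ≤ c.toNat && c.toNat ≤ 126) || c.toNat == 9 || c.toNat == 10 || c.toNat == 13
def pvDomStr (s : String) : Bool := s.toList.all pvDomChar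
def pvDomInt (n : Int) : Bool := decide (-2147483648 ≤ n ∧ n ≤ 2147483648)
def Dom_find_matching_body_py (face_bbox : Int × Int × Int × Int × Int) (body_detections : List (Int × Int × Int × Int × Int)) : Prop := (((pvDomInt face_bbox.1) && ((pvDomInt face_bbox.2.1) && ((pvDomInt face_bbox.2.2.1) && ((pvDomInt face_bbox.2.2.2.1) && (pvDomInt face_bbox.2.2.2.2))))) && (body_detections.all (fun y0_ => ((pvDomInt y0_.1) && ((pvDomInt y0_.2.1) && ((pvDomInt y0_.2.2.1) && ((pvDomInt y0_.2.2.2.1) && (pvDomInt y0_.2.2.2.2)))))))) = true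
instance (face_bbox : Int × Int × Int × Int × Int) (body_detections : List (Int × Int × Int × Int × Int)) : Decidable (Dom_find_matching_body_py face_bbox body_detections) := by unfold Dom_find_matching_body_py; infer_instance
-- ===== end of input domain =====

-- B replaces A's running-minimum scan by stable-sorting the qualifying bodies by horizontal center distance and taking the first element (stability preserves A's first-minimum tie-break); alternative algorithm, same values.


-- ===== PORT A =====
-- A's loop keeps a running best_body and min_distance; min_distance = float("inf")
-- is modelled as `none` of an `Option Int` (it only ever compares as "larger than any distance").
def find_matching_body_py (face_bbox : Int × Int × Int × Int × Int) (body_detections : List (Int × Int × Int × Int × Int)) : Option (Int × Int × Int × Int × Int) :=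
  let face_center_x := face_bbox.1 + PySem.Int.floordiv face_bbox.2.2.1 2
  let face_center_y := face_bbox.2.1 + PySem.Int.floordiv face_bbox.2.2.2.1 2
  let r := body_detections.foldl (fun (st : Option (Int × Int × Int × Int × Int) × Option Int) body_bbox =>
    let body_center_x := body_bbox.1 + PySem.Int.floordiv body_bbox.2.2.1 2
    let body_center_y := body_bbox.2.1 + PySem.Int.floordiv body_bbox.2.2.2.1 2
    if face_center_y < body_center_y ∧ face_center_x > body_bbox.1 ∧ face_center_x < body_bbox.1 + body_bbox.2.2.1 then
      let distance := |face_center_x - body_center_x|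
      match st.2 with
      | none => (some body_bbox, some distance)
      | some m => if distance < m then (some body_bbox, some distance) else st
    else st) (none, none)
  r.1

-- ===== PORT B =====
-- B filters the qualifying bodies, stable-sorts them by |face_center_x - body_center_x|
-- (PySem.List.sorted = Python's stable sorted) and returns the first element, or none if empty.
def find_matching_body_py_alt (face_bbox : Int × Int × Int × Int × Int) (body_detections : List (Int × Int × Int × Int × Int)) : Option (Int × Int × Int × Int × Int) :=
  let face_center_x := face_bbox.1 + PySem.Int.floordiv face_bbox.2.2.1 2
  let face_center_y := face_bbox.2.1 + PySem.Int.floordiv face_bbox.2.2.2.1 2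
  let candidates := body_detections.filter (fun b =>
    decide (face_center_y < b.2.1 + PySem.Int.floordiv b.2.2.2.1 2) &&
    (decide (b.1 < face_center_x) && decide (face_center_x < b.1 + b.2.2.1)))
  let ranked := PySem.List.sorted candidates (fun b => |face_center_x - (b.1 + PySem.Int.floordiv b.2.2.1 2)|)
  ranked.head?

-- ===== PRECONDITION & SPEC =====
def Spec_find_matching_body_py (face_bbox : Int × Int × Int × Int × Int) (body_detections : List (Int × Int × Int × Int × Int)) (out : Option (Int × Int × Int × Int × Int)) : Prop := out = find_matching_body_py_alt face_bbox body_detections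
instance (face_bbox : Int × Int × Int × Int × Int) (body_detections : List (Int × Int × Int × Int × Int)) (out : Option (Int × Int × Int × Int × Int)) : Decidable (Spec_find_matching_body_py face_bbox body_detections out) := by unfold Spec_find_matching_body_py; infer_instance

-- ===== CLAIM (what is proved, stated in full; the proofs are below) =====
def Claim_equal_find_matching_body_py : Prop := ∀ (face_bbox : Int × Int × Int × Int × Int) (body_detections : List (Int × Int × Int × Int × Int)), Dom_find_matching_body_py face_bbox body_detections → Spec_find_matching_body_py face_bbox body_detections (find_matching_body_py face_bbox body_detections)

-- ===== LEMMAS AND PROOFS =====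

-- Shared running-min step under a key (first element wins ties): used to characterise
-- both A's accumulating loop and the head of B's stable sort.
def optMinStep {α : Type} (key : α → Int) (m : Option α) (x : α) : Option α :=
  match m with
  | none => some x
  | some m' => if key x < key m' then some x else some m'

-- The head of an insertBy insertion: x goes in front iff `before x h`.
lemma head_insertBy {α : Type} (b : α → α → Bool) (x : α) (ys : List α) :
    (PySem.List.insertBy b x ys).head? =
      (match ys with | [] => some x | h :: _ => if b x h then some x else some h) := by
  cases ys with
  | nil => simp [PySem.List.insertBy]
  | cons h t =>
    by_cases hb : b x h = true <;> simp [PySem.List.insertBy, hb]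

-- The head of Python's stable insertion sort IS the first-minimum running-min loop:
-- an insertion only changes the head when the new key is strictly smaller.
lemma head_sorted_eq_runmin {α : Type} (key : α → Int) (xs : List α) :
    (PySem.List.sorted xs key).head? = xs.foldl (optMinStep key) none := by
  rw [PySem.List.sorted_eq_foldl_insertBy]
  have h : ∀ acc : List α,
      (xs.foldl (fun acc x => PySem.List.insertBy (fun a b => decide (key a < key b)) x acc) acc).head? =
      xs.foldl (optMinStep key) acc.head? := by
    induction xs with
    | nil => intro acc; rfl
    | cons x t ih =>
      intro acc
      simp only [List.foldl_cons]
      rw [ih]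
      congr 1
      rw [head_insertBy]
      cases acc with
      | nil => rfl
      | cons h t' =>
        by_cases hlt : key x < key h
        · simp [optMinStep, hlt]
        · simp [optMinStep, hlt]
  exact h []

-- A's accumulating loop over xs equals the running-min fold over the filtered list, for any start
-- state of the invariant shape (best, best.map key) where key is the distance |fcx - body_center_x|.
lemma loop_eq_min_fold (fcx fcy : Int) (xs : List (Int × Int × Int × Int × Int)) :
    ∀ best : Option (Int × Int × Int × Int × Int),
    (xs.foldl (fun (st : Option (Int × Int × Int × Int × Int) × Option Int) body_bbox =>
      let body_center_x := body_bbox.1 + PySem.Int.floordiv body_bbox.2.2.1 2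
      let body_center_y := body_bbox.2.1 + PySem.Int.floordiv body_bbox.2.2.2.1 2
      if fcy < body_center_y ∧ fcx > body_bbox.1 ∧ fcx < body_bbox.1 + body_bbox.2.2.1 then
        let distance := |fcx - body_center_x|
        match st.2 with
        | none => (some body_bbox, some distance)
        | some m => if distance < m then (some body_bbox, some distance) else st
      else st) (best, best.map (fun b => |fcx - (b.1 + PySem.Int.floordiv b.2.2.1 2)|))).1
    = (xs.filter (fun b =>
        decide (fcy < b.2.1 + PySem.Int.floordiv b.2.2.2.1 2) &&
        (decide (b.1 < fcx) && decide (fcx < b.1 + b.2.2.1)))).foldl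
        (optMinStep (fun b => |fcx - (b.1 + PySem.Int.floordiv b.2.2.1 2)|)) best := by
  induction xs with
  | nil => intro best; simp
  | cons x t ih =>
    intro best
    by_cases hp : fcy < x.2.1 + PySem.Int.floordiv x.2.2.2.1 2 ∧ fcx > x.1 ∧ fcx < x.1 + x.2.2.1
    · have hb : (decide (fcy < x.2.1 + PySem.Int.floordiv x.2.2.2.1 2) &&
          (decide (x.1 < fcx) && decide (fcx < x.1 + x.2.2.1))) = true := by
        simp only [Bool.and_eq_true, decide_eq_true_eq]
        exact ⟨hp.1, hp.2.1, hp.2.2⟩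
      cases best with
      | none =>
        simp only [List.foldl_cons, List.filter_cons, hb, if_pos hp, if_true, Option.map_none,
          optMinStep]
        exact ih (some x)
      | some m =>
        simp only [List.foldl_cons, List.filter_cons, hb, if_pos hp, if_true, Option.map_some,
          optMinStep]
        by_cases hd : |fcx - (x.1 + PySem.Int.floordiv x.2.2.1 2)| < |fcx - (m.1 + PySem.Int.floordiv m.2.2.1 2)|
        · rw [if_pos hd, if_pos hd]
          exact ih (some x)
        · rw [if_neg hd, if_neg hd]
          exact ih (some m)
    · have hb : (decide (fcy < x.2.1 + PySem.Int.floordiv x.2.2.2.1 2) &&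
          (decide (x.1 < fcx) && decide (fcx < x.1 + x.2.2.1))) = false := by
        rw [Bool.eq_false_iff]
        intro hc
        simp only [Bool.and_eq_true, decide_eq_true_eq] at hc
        exact hp ⟨hc.1, hc.2.1, hc.2.2⟩
      simp only [List.foldl_cons, List.filter_cons, hb, if_neg hp, if_false, Bool.false_eq_true]
      exact ih best

-- ===== VERDICT (by name: the statement is the Claim_ definition above) =====
theorem find_matching_body_py_spec : Claim_equal_find_matching_body_py := by
  intro face_bbox body_detections _
  unfold Spec_find_matching_body_py find_matching_body_py find_matching_body_py_alt
  have h := loop_eq_min_fold (face_bbox.1 + PySem.Int.floordiv face_bbox.2.2.1 2)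
    (face_bbox.2.1 + PySem.Int.floordiv face_bbox.2.2.2.1 2) body_detections none
  simp only [Option.map_none] at h
  have h2 := head_sorted_eq_runmin
    (fun (b : Int × Int × Int × Int × Int) => |(face_bbox.1 + PySem.Int.floordiv face_bbox.2.2.1 2) - (b.1 + PySem.Int.floordiv b.2.2.1 2)|)
    (body_detections.filter (fun b =>
      decide (face_bbox.2.1 + PySem.Int.floordiv face_bbox.2.2.2.1 2 < b.2.1 + PySem.Int.floordiv b.2.2.2.1 2) &&
      (decide (b.1 < face_bbox.1 + PySem.Int.floordiv face_bbox.2.2.1 2) &&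
       decide (face_bbox.1 + PySem.Int.floordiv face_bbox.2.2.1 2 < b.1 + b.2.2.1))))
  exact h.trans h2.symm
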